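-- pv_equiv track=rewrite | github.com/jenny-jione/programmers | Practice/select_tangerine.py | solution
-- ===== SOURCE A (Python) =====
-- def solution(k, tangerine):
--     answer = 0
--     # 개수가 많은 것부터 세면 종류가 적어짐.
--     kind = {}
--     for t in tangerine:
--         kind.setdefault(t, 0)
--         kind[t] += 1
--
--     sorted_kind = sorted(kind.items(), key = lambda x: x[1], reverse = True)
--
--     for key, val in sorted_kind:
--         k -= val
--         answer += 1
--         if k <= 0:
--             break
--     return answer
-- ===== SOURCE B (Python) =====
-- def solution(k, tangerine):
--     # Bucket (counting) approach: count frequencies, bucket the frequency values,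
--     # then walk possible frequencies from largest to smallest -- no comparison sort.
--     freq = {}
--     for t in tangerine:
--         freq[t] = freq.get(t, 0) + 1
--     bucket = {}
--     for c in freq.values():
--         bucket[c] = bucket.get(c, 0) + 1
--     answer = 0
--     for c in range(len(tangerine), 0, -1):
--         m = bucket.get(c, 0)
--         while m > 0:
--             answer += 1
--             k -= c
--             m -= 1
--             if k <= 0:
--                 return answer
--     return answer
-- ===== Notes on version B (the rewrite author's own statement) =====
-- stated objective: alternative
-- what changed: Replaces the comparison sort of (kind,count) items with a counting/bucket pass over the frequency values, walking possible frequencies from the largest downward; O(n) vs O(n log n) asymptotically, though not measurably faster in CPython at the tested sizes.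
import Mathlib
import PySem

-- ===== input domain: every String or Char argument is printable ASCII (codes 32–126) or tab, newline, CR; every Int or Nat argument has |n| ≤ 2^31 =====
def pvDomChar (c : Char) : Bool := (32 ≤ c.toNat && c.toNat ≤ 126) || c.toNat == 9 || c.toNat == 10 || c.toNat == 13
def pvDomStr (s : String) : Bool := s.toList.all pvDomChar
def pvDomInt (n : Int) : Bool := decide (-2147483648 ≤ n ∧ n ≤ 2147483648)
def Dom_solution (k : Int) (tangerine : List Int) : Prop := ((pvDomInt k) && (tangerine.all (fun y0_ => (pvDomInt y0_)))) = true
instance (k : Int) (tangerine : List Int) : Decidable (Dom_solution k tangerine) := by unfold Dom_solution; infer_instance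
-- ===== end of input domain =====

-- B replaces A's comparison sort of the (kind, count) items with a counting/bucket pass
-- over the frequency values, walking possible frequencies from the largest downward (objective: alternative algorithm).

-- ===== PORT A =====
-- the 'for key, val in sorted_kind: k -= val; answer += 1; if k <= 0: break' loop
def aLoop (k answer : Int) : List (Int × Int) → Int
  | [] => answer
  | (_, v) :: rest =>
      if k - v ≤ 0 then answer + 1 else aLoop (k - v) (answer + 1) rest

def solution (k : Int) (tangerine : List Int) : Int :=
  let kind : PySem.Dict Int Int :=
    tangerine.foldl (fun d t =>
      let d1 := d.setdefault t 0
      d1.insert t (d1.getD t 0 + 1)) PySem.Dict.empty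
  let sorted_kind := PySem.List.sorted kind.items (fun x => x.2) true
  aLoop k 0 sorted_kind

-- ===== PORT B =====
-- the inner 'while m > 0: answer += 1; k -= c; m -= 1; if k <= 0: return answer' loop;
-- the Bool marks whether the early 'return' fired
def takeB (k answer c m : Int) : Int × Int × Bool :=
  if h : 0 < m then
    if k - c ≤ 0 then (k - c, answer + 1, true)
    else takeB (k - c) (answer + 1) c (m - 1)
  else (k, answer, false)
termination_by m.toNat
decreasing_by omega

-- the outer 'for c in range(len(tangerine), 0, -1)' loop
def bLoop (bucket : PySem.Dict Int Int) (k answer : Int) : List Int → Int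
  | [] => answer
  | c :: cs =>
      match takeB k answer c (bucket.getD c 0) with
      | (_, a', true) => a'
      | (k', a', false) => bLoop bucket k' a' cs

def solution_alt (k : Int) (tangerine : List Int) : Int :=
  let freq : PySem.Dict Int Int :=
    tangerine.foldl (fun d t => d.insert t (d.getD t 0 + 1)) PySem.Dict.empty
  let bucket : PySem.Dict Int Int :=
    freq.values.foldl (fun d c => d.insert c (d.getD c 0 + 1)) PySem.Dict.empty
  bLoop bucket k 0 (PySem.List.pyRange (tangerine.length : Int) 0 (-1))

-- ===== PRECONDITION & SPEC =====
def Spec_solution (k : Int) (tangerine : List Int) (out : Int) : Prop := out = solution_alt k tangerine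
instance (k : Int) (tangerine : List Int) (out : Int) : Decidable (Spec_solution k tangerine out) := by unfold Spec_solution; infer_instance

-- ===== CLAIM (what is proved, stated in full; the proofs are below) =====
def Claim_equal_solution : Prop := ∀ (k : Int) (tangerine : List Int), Dom_solution k tangerine → Spec_solution k tangerine (solution k tangerine)

-- ===== LEMMAS AND PROOFS =====

-- the greedy consumer, as a function of the list of counts alone
def gLoop (k answer : Int) : List Int → Int
  | [] => answer
  | v :: rest =>
      if k - v ≤ 0 then answer + 1 else gLoop (k - v) (answer + 1) rest

theorem aLoop_eq_gLoop (L : List (Int × Int)) : ∀ k a, aLoop k a L = gLoop k a (L.map (·.2)) := by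
  induction L with
  | nil => intro k a; rfl
  | cons p rest ih =>
      intro k a
      obtain ⟨x, v⟩ := p
      simp only [aLoop, List.map, gLoop]
      split_ifs with h
      · rfl
      · exact ih _ _

-- A's counting step is Counter's step
theorem setdefault_incr (d : PySem.Dict Int Int) (t : Int) :
    (d.setdefault t 0).insert t ((d.setdefault t 0).getD t 0 + 1) = d.modify t 0 (· + 1) := by
  by_cases h : d.contains t = true
  · rw [PySem.Dict.setdefault_of_contains d 0 h]
    simp [PySem.Dict.modify, PySem.Dict.insert, PySem.Dict.getD, h]
  · have h' : d.contains t = false := by simpa using h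
    have hk : ∀ p ∈ d.items, ¬ (p.1 = t) := by
      intro p hp hpt
      rw [PySem.Dict.contains_eq_decide_mem_keys] at h'
      simp [PySem.Dict.keys] at h'
      exact h' p.2 (by rw [← hpt]; simpa using hp)
    rw [PySem.Dict.setdefault_of_not_contains d 0 h']
    rw [PySem.Dict.getD_insert_self]
    simp [PySem.Dict.modify, PySem.Dict.insert, PySem.Dict.getD, h', PySem.Dict.get?]
    refine ⟨?_, ?_⟩
    · rw [List.map_congr_left (g := id) (by intro p hp; simp [hk p hp]), List.map_id]
    · rw [List.find?_eq_none.mpr (by intro p hp; simpa using hk p hp)]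
      rfl

theorem kind_eq_counter (tangerine : List Int) :
    tangerine.foldl (fun d t =>
      let d1 := d.setdefault t 0
      d1.insert t (d1.getD t 0 + 1)) PySem.Dict.empty = PySem.Dict.counter tangerine := by
  rw [PySem.Dict.counter_eq_foldl]
  congr 1
  funext d t
  exact setdefault_incr d t

-- gLoop over a replicate block is takeB
theorem gLoop_replicate (c : Int) (m : Nat) :
    ∀ k a (rest : List Int),
      gLoop k a (List.replicate m c ++ rest) =
        match takeB k a c (m : Int) with
        | (_, a', true) => a'
        | (k', a', false) => gLoop k' a' rest := by
  induction m with
  | zero =>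
      intro k a rest
      rw [takeB]
      simp
  | succ m ih =>
      intro k a rest
      rw [takeB]
      have hpos : (0 : Int) < ((m : Int) + 1) := by positivity
      simp only [List.replicate_succ, List.cons_append, gLoop, Nat.cast_succ, hpos, dif_pos]
      split_ifs with h
      · rfl
      · have : ((m : Int) + 1 - 1) = (m : Int) := by ring
        rw [this]
        exact ih _ _ _

-- bLoop is gLoop on the flattened buckets, provided all bucket entries are the counts in vals
theorem bLoop_eq_gLoop (vals : List Int) (bucket : PySem.Dict Int Int)
    (hb : ∀ c, bucket.getD c 0 = (vals.count c : Int)) (cs : List Int) :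
    ∀ k a, bLoop bucket k a cs = gLoop k a (cs.flatMap (fun c => List.replicate (vals.count c) c)) := by
  induction cs with
  | nil => intro k a; rfl
  | cons c cs ih =>
      intro k a
      rw [List.flatMap_cons, gLoop_replicate]
      simp only [bLoop, hb c]
      cases htb : takeB k a c ((vals.count c : Int)) with
      | mk k' p =>
        cases p with
        | mk a' done =>
          cases done
          · exact ih _ _
          · rfl

-- count of any x in the flattened bucket list
theorem count_flat (vals : List Int) (x : Int) :
    ∀ n : Nat, ((PySem.List.pyRange (n : Int) 0 (-1)).flatMap
        (fun c => List.replicate (vals.count c) c)).count x =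
      if 1 ≤ x ∧ x ≤ (n : Int) then vals.count x else 0 := by
  intro n
  induction n with
  | zero =>
      simp only [Nat.cast_zero, PySem.List.pyRange_neg_one_eq_nil le_rfl, List.flatMap_nil,
        List.count_nil]
      have : ¬ (1 ≤ x ∧ x ≤ (0 : Int)) := by omega
      rw [if_neg this]
  | succ n ih =>
      rw [PySem.List.pyRange_neg_one_cons (by omega)]
      have he : (((n + 1 : Nat) : Int) - 1) = (n : Int) := by push_cast; ring
      rw [List.flatMap_cons, List.count_append, List.count_replicate, he, ih]
      by_cases hx : x = ((n + 1 : Nat) : Int)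
      · subst hx
        have h1 : (1 : Int) ≤ ((n + 1 : Nat) : Int) ∧ ((n + 1 : Nat) : Int) ≤ ((n + 1 : Nat) : Int) := by
          constructor <;> push_cast <;> omega
        have h2 : ¬ ((1 : Int) ≤ ((n + 1 : Nat) : Int) ∧ ((n + 1 : Nat) : Int) ≤ (n : Int)) := by
          push_cast; omega
        rw [if_pos h1, if_neg h2, beq_self_eq_true]
        simp
      · have hb : (((n + 1 : Nat) : Int) == x) = false := by simpa using fun h => hx h.symm
        rw [hb]
        have hxn : ¬ x = ((n + 1 : Nat) : Int) := hx
        push_cast at hxn ⊢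
        split_ifs with h1 h2 h2 <;> first | rfl | omega

-- the flattened bucket list is a permutation of vals
theorem flat_perm (vals : List Int) (n : Nat)
    (hv : ∀ v ∈ vals, 1 ≤ v ∧ v ≤ (n : Int)) :
    ((PySem.List.pyRange (n : Int) 0 (-1)).flatMap
        (fun c => List.replicate (vals.count c) c)).Perm vals := by
  rw [List.perm_iff_count]
  intro x
  rw [count_flat]
  by_cases hx : 1 ≤ x ∧ x ≤ (n : Int)
  · simp [hx]
  · have : x ∉ vals := fun hm => hx (hv x hm)
    simp [hx, List.count_eq_zero_of_not_mem this]

-- the flattened bucket list is non-increasing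
theorem flat_pairwise (vals : List Int) (n : Nat) :
    ((PySem.List.pyRange (n : Int) 0 (-1)).flatMap
        (fun c => List.replicate (vals.count c) c)).Pairwise (fun u v => v ≤ u) := by
  induction n with
  | zero => simp [PySem.List.pyRange_neg_one_eq_nil]
  | succ n ih =>
      rw [PySem.List.pyRange_neg_one_cons (by omega)]
      have he : (((n + 1 : Nat) : Int) - 1) = (n : Int) := by push_cast; ring
      rw [List.flatMap_cons, he]
      apply List.pairwise_append.mpr
      refine ⟨?_, ih, ?_⟩
      · exact List.pairwise_replicate.mpr (Or.inr le_rfl)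
      · intro u hu v hv
        rcases List.eq_of_mem_replicate hu with rfl
        rcases List.mem_flatMap.mp hv with ⟨c, hc, hvr⟩
        rcases List.eq_of_mem_replicate hvr with rfl
        have := (PySem.List.mem_pyRange_neg_one.mp hc).2
        push_cast at this ⊢
        omega

theorem solution_eq (k : Int) (tangerine : List Int) :
    solution k tangerine = solution_alt k tangerine := by
  unfold solution solution_alt
  rw [kind_eq_counter, PySem.Dict.foldl_insert_getD_add_one_eq_counter]
  set vals := (PySem.Dict.counter tangerine).values with hvals
  have hbucket : ∀ c, (vals.foldl (fun d c => d.insert c (d.getD c 0 + 1)) PySem.Dict.empty).getD c 0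
      = (vals.count c : Int) := by
    intro c
    rw [PySem.Dict.foldl_insert_getD_add_one_eq_counter, PySem.Dict.getD_counter]
  rw [bLoop_eq_gLoop vals _ hbucket, aLoop_eq_gLoop]
  congr 1
  -- both sides are non-increasing rearrangements of vals
  have hvmem : ∀ v ∈ vals, 1 ≤ v ∧ v ≤ (tangerine.length : Int) := by
    intro v hv
    rw [hvals, PySem.Dict.values, PySem.Dict.items_counter] at hv
    simp only [List.map_map, List.mem_map, Function.comp] at hv
    rcases hv with ⟨x, hx, rfl⟩
    have hxmem : x ∈ tangerine := by
      exact (PySem.Set.mem_ofList tangerine x).mp hx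
    constructor
    · exact_mod_cast List.count_pos_iff.mpr hxmem
    · exact_mod_cast List.count_le_length
  have hpermA : ((PySem.List.sorted (PySem.Dict.counter tangerine).items (fun x => x.2) true).map (·.2)).Perm vals := by
    rw [hvals, PySem.Dict.values]
    exact (PySem.List.sorted_perm _ _ _).map _
  have hpairA : ((PySem.List.sorted (PySem.Dict.counter tangerine).items (fun x => x.2) true).map (·.2)).Pairwise (fun u v => v ≤ u) := by
    apply List.pairwise_map.mpr
    exact PySem.List.sorted_pairwise_rev _ _
  have hpermB := flat_perm vals tangerine.length hvmem
  have hpairB := flat_pairwise vals tangerine.length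
  exact List.Perm.eq_of_pairwise (fun a b _ _ h h' => le_antisymm h' h) hpairA hpairB
    (hpermA.trans hpermB.symm)

-- ===== VERDICT (by name: the statement is the Claim_ definition above) =====
theorem solution_spec : Claim_equal_solution := by
  intro k tangerine _
  unfold Spec_solution
  exact solution_eq k tangerine
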